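-- pv_equiv track=rewrite | github.com/reykjavik-university/2020-3-T-111-PROG | assignments/functions/advanced/tetris.py | rotate_text_clockwise
-- ===== SOURCE A (Python) =====
-- def rotate_text_clockwise(text):
--     """ Rotates text 90 degrees clockwise, adding spaces as needed for multi-line strings """
--     lines = text.splitlines()
--     max_length = 0
--     for line in lines:
--         if len(line) > max_length:
--             max_length = len(line)
--     rotated_text = ""
--     for character_index in range(max_length):
--         for line in reversed(lines):
--             if len(line) > character_index:
--                 character_to_add = line[character_index]
--             else:
--                 character_to_add = " "
--             rotated_text += character_to_add
--         rotated_text += "\n"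
--     return rotated_text.rstrip("\n")
-- ===== SOURCE B (Python) =====
-- def rotate_text_clockwise(text):
--     """ Rotates text 90 degrees clockwise, adding spaces as needed for multi-line strings """
--     rows, depth = [], 0
--     for line in text.splitlines():
--         rows = [(line[j] if j < len(line) else ' ') +
--                 (rows[j] if j < len(rows) else ' ' * depth)
--                 for j in range(max(len(line), len(rows)))]
--         depth += 1
--     return "\n".join(rows)
-- ===== Notes on version B (the rewrite author's own statement) =====
-- stated objective: alternative
-- what changed: B replaces A's max-length pre-pass plus column-by-column scan with quadratic string += by a single incremental fold over the lines, prepending each line's characters as a new leading column onto the rows built so far (padding new rows by the number of lines already processed) and joining once at the end.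
import Mathlib
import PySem

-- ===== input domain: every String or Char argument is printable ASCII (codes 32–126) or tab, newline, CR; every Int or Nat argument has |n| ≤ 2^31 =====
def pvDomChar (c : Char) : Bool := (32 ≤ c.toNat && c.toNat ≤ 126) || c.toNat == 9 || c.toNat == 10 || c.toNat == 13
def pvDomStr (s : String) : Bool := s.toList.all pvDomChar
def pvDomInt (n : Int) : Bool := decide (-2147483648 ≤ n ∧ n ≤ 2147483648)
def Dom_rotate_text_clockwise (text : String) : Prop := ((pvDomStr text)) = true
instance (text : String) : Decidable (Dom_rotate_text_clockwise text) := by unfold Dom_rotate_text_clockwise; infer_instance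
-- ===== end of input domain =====

-- B builds the rotation incrementally: one fold over the lines, each line prepended as a new
-- leading column onto the rows built so far — no max-length pre-pass, no per-column scan of all lines.

-- ===== PORT A =====
-- exact port of `.rstrip("\n")`: drop the trailing '\n' characters
def pvRstripNl (cs : List Char) : List Char :=
  (cs.reverse.dropWhile (fun c => c == '\n')).reverse

def rotate_text_clockwise (text : String) : String :=
  let lines := PySem.Chars.splitlines text.toList
  let max_length := lines.foldl
    (fun m line => if (line.length : Int) > m then (line.length : Int) else m) 0
  let rotated := (PySem.List.pyRange 0 max_length 1).foldl
    (fun acc i =>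
      (lines.reverse.foldl
        (fun a line =>
          a ++ [if (line.length : Int) > i then (PySem.List.pyGet? line i).getD ' ' else ' '])
        acc) ++ ['\n'])
    []
  String.ofList (pvRstripNl rotated)

-- ===== PORT B =====
def rotate_text_clockwise_alt (text : String) : String :=
  let final := (PySem.Chars.splitlines text.toList).foldl
    (fun st line =>
      ((List.range (max line.length st.1.length)).map (fun j =>
        (if j < line.length then line.getD j ' ' else ' ') ::
        (if j < st.1.length then st.1.getD j [] else List.replicate st.2 ' ')), st.2 + 1))
    (([] : List (List Char)), 0)
  String.ofList (PySem.Chars.join ['\n'] final.1)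

-- ===== PRECONDITION & SPEC =====
def Spec_rotate_text_clockwise (text : String) (out : String) : Prop := out = rotate_text_clockwise_alt text
instance (text : String) (out : String) : Decidable (Spec_rotate_text_clockwise text out) := by unfold Spec_rotate_text_clockwise; infer_instance

-- ===== CLAIM (what is proved, stated in full; the proofs are below) =====
def Claim_equal_rotate_text_clockwise : Prop := ∀ (text : String), Dom_rotate_text_clockwise text → Spec_rotate_text_clockwise text (rotate_text_clockwise text)

-- ===== LEMMAS AND PROOFS =====

-- the common maximum-line-length
def pvMaxLen (ls : List (List Char)) : Nat := ls.foldr (fun r n => max r.length n) 0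

-- the j-th output row: the j-th character (space-padded) of each line, last line first
def pvRow (p : List (List Char)) (j : Nat) : List Char :=
  p.reverse.map (fun l => l.getD j ' ')

lemma pvMaxLen_le {ls : List (List Char)} {r : List Char} (h : r ∈ ls) :
    r.length ≤ pvMaxLen ls := by
  induction ls with
  | nil => cases h
  | cons a t ih =>
    rcases List.mem_cons.mp h with h' | h'
    · subst h'; simp [pvMaxLen]
    · exact le_trans (ih h') (by simp only [pvMaxLen, List.foldr_cons]; omega)

lemma pvMaxLen_A (ls : List (List Char)) (m : Int) (hm : 0 ≤ m) :
    ls.foldl (fun m line => if (line.length : Int) > m then (line.length : Int) else m) m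
      = max m ((pvMaxLen ls : Int)) := by
  induction ls generalizing m with
  | nil => simp [pvMaxLen]; omega
  | cons a t ih =>
    simp only [List.foldl_cons, pvMaxLen, List.foldr_cons]
    rw [ih (if (a.length : Int) > m then (a.length : Int) else m) (by split_ifs <;> omega)]
    simp only [pvMaxLen]
    split_ifs <;> push_cast <;> omega

lemma pvMaxLen_append (xs ys : List (List Char)) :
    pvMaxLen (xs ++ ys) = max (pvMaxLen xs) (pvMaxLen ys) := by
  induction xs with
  | nil => simp [pvMaxLen]
  | cons a t ih =>
    simp only [pvMaxLen, List.cons_append, List.foldr_cons] at *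
    omega

-- past the maximal length every padded character is a space
lemma pvRow_of_ge (p : List (List Char)) (j : Nat) (h : pvMaxLen p ≤ j) :
    pvRow p j = List.replicate p.length ' ' := by
  apply List.eq_replicate_iff.mpr
  constructor
  · simp [pvRow]
  · intro c hc
    obtain ⟨l, hl, rfl⟩ := List.mem_map.mp hc
    have := pvMaxLen_le (List.mem_reverse.mp hl)
    rw [List.getD_eq_getElem?_getD, List.getElem?_eq_none (by omega)]
    rfl

lemma pvRow_snoc (p : List (List Char)) (a : List Char) (j : Nat) :
    pvRow (p ++ [a]) j = a.getD j ' ' :: pvRow p j := by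
  simp [pvRow, List.reverse_append]

-- invariant of B's fold: after processing p, rows = the pvMaxLen p columns and depth = p.length
lemma pvFold_inv : ∀ (ls p : List (List Char)),
    ls.foldl
      (fun st line =>
        ((List.range (max line.length st.1.length)).map (fun j =>
          (if j < line.length then line.getD j ' ' else ' ') ::
          (if j < st.1.length then st.1.getD j [] else List.replicate st.2 ' ')), st.2 + 1))
      ((List.range (pvMaxLen p)).map (pvRow p), p.length)
    = ((List.range (pvMaxLen (p ++ ls))).map (pvRow (p ++ ls)), (p ++ ls).length) := by
  intro ls
  induction ls with
  | nil => intro p; simp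
  | cons a t ih =>
    intro p
    rw [List.foldl_cons]
    have hstep :
        ((List.range (max a.length ((List.range (pvMaxLen p)).map (pvRow p)).length)).map (fun j =>
          (if j < a.length then a.getD j ' ' else ' ') ::
          (if j < ((List.range (pvMaxLen p)).map (pvRow p)).length
            then ((List.range (pvMaxLen p)).map (pvRow p)).getD j []
            else List.replicate p.length ' ')), p.length + 1)
        = ((List.range (pvMaxLen (p ++ [a]))).map (pvRow (p ++ [a])), (p ++ [a]).length) := by
      have hlen : ((List.range (pvMaxLen p)).map (pvRow p)).length = pvMaxLen p := by simp
      have hmax : max a.length (pvMaxLen p) = pvMaxLen (p ++ [a]) := by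
        rw [pvMaxLen_append]; simp [pvMaxLen]; omega
      refine Prod.ext ?_ (by simp)
      simp only [hlen, hmax]
      apply List.map_congr_left
      intro j hj
      rw [pvRow_snoc]
      congr 1
      · split_ifs with h
        · rfl
        · rw [List.getD_eq_getElem?_getD, List.getElem?_eq_none (by omega)]; rfl
      · split_ifs with h
        · rw [List.getD_eq_getElem?_getD]
          simp [h]
        · exact (pvRow_of_ge p j (by omega)).symm
    rw [hstep, ih (p ++ [a])]
    simp

-- no line produced by splitlines contains '\n'
lemma pvSplitlines_go_no_nl (isB : Char → Bool) (hnl : isB '\n' = true)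
    (s cur : List Char) (acc : List (List Char)) :
    ('\n' ∉ cur) → (∀ l ∈ acc, '\n' ∉ l) →
    ∀ l ∈ PySem.Chars.splitlines.go isB s cur acc, '\n' ∉ l := by
  induction s, cur, acc using PySem.Chars.splitlines.go.induct isB with
  | case1 cur acc hemp =>
    intro hcur hacc l hl
    rw [PySem.Chars.splitlines.go.eq_def] at hl
    dsimp only at hl
    rw [if_pos hemp] at hl
    exact hacc l (List.mem_reverse.mp hl)
  | case2 cur acc hemp =>
    intro hcur hacc l hl
    rw [PySem.Chars.splitlines.go.eq_def] at hl
    dsimp only at hl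
    rw [if_neg hemp] at hl
    rw [List.mem_reverse] at hl
    rcases List.mem_cons.mp hl with h | h
    · subst h; simpa using hcur
    · exact hacc l h
  | case3 rest cur acc ih =>
    intro hcur hacc
    rw [PySem.Chars.splitlines.go.eq_def]
    exact ih (by simp) (by
      intro l hl
      rcases List.mem_cons.mp hl with h | h
      · subst h; simpa using hcur
      · exact hacc l h)
  | case4 c rest cur acc hpat hc ih =>
    intro hcur hacc
    rw [PySem.Chars.splitlines.go.eq_def]
    split
    next heq => exact absurd heq (by simp)
    next rest1 heq =>
      injection heq with h1 h2
      exact (hpat rest1 h1 h2).elim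
    next c' rest' hpat' heq =>
      injection heq with h1 h2
      subst h1; subst h2
      rw [if_pos hc]
      refine ih (by simp) ?_
      intro l hl
      rcases List.mem_cons.mp hl with h | h
      · subst h; simpa using hcur
      · exact hacc l h
  | case5 c rest cur acc hpat hc ih =>
    intro hcur hacc
    rw [PySem.Chars.splitlines.go.eq_def]
    split
    next heq => exact absurd heq (by simp)
    next rest1 heq =>
      injection heq with h1 h2
      exact (hpat rest1 h1 h2).elim
    next c' rest' hpat' heq =>
      injection heq with h1 h2
      subst h1; subst h2
      rw [if_neg hc]
      refine ih ?_ hacc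
      intro hmem
      rcases List.mem_cons.mp hmem with h | h
      · exact hc (h ▸ hnl)
      · exact hcur h

lemma pvSplitlines_no_nl (cs : List Char) :
    ∀ l ∈ PySem.Chars.splitlines cs, '\n' ∉ l := by
  unfold PySem.Chars.splitlines
  apply pvSplitlines_go_no_nl
  · decide
  · simp
  · intro l hl; cases hl

-- rstrip("\n") over an append whose right part keeps a non-'\n' char
lemma pvRstripNl_append (a b : List Char) (hb : pvRstripNl b ≠ []) :
    pvRstripNl (a ++ b) = a ++ pvRstripNl b := by
  unfold pvRstripNl at *
  rw [List.reverse_append, List.dropWhile_append]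
  split_ifs with h
  · rw [List.isEmpty_iff] at h
    rw [h] at hb
    simp at hb
  · simp

lemma pvRstripNl_single (r : List Char) (_hr : r ≠ []) (hnl : '\n' ∉ r) :
    pvRstripNl (r ++ ['\n']) = r := by
  unfold pvRstripNl
  rw [List.reverse_append]
  simp only [List.reverse_cons, List.reverse_nil, List.nil_append, List.singleton_append]
  rw [List.dropWhile_cons_of_pos (by simp)]
  rw [List.dropWhile_eq_self_iff.mpr, List.reverse_reverse]
  intro hl
  have hmem : r.reverse[0] ∈ r := List.mem_reverse.mp (List.getElem_mem hl)
  simp only [beq_iff_eq]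
  intro hx
  exact hnl (hx ▸ hmem)

lemma pvJoin_ne_nil (r : List Char) (rs : List (List Char)) (hr : r ≠ []) :
    PySem.Chars.join ['\n'] (r :: rs) ≠ [] := by
  cases rs with
  | nil => simpa [PySem.Chars.join_singleton] using hr
  | cons b t =>
    rw [PySem.Chars.join_cons_cons]
    simp [hr]

-- rstrip("\n") of the concatenation of the newline-terminated rows is their "\n"-join
lemma pvAssemble (row : Nat → List Char) :
    ∀ (idx : List Nat), idx ≠ [] → (∀ k ∈ idx, row k ≠ [] ∧ '\n' ∉ row k) →
    pvRstripNl (idx.flatMap (fun k => row k ++ ['\n']))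
      = PySem.Chars.join ['\n'] (idx.map row)
  | [], h, _ => absurd rfl h
  | [k], _, hp => by
    simp only [List.flatMap_cons, List.flatMap_nil, List.append_nil, List.map_cons, List.map_nil]
    rw [PySem.Chars.join_singleton]
    exact pvRstripNl_single _ (hp k (by simp)).1 (hp k (by simp)).2
  | k :: k' :: t, _, hp => by
    have ih := pvAssemble row (k' :: t) (by simp)
      (fun j hj => hp j (List.mem_cons_of_mem _ hj))
    have hjoin : PySem.Chars.join ['\n'] ((k' :: t).map row) ≠ [] := by
      rw [List.map_cons]
      exact pvJoin_ne_nil _ _ (hp k' (by simp)).1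
    have hfl : List.flatMap (fun k => row k ++ ['\n']) (k :: k' :: t)
        = (row k ++ ['\n']) ++ List.flatMap (fun k => row k ++ ['\n']) (k' :: t) := by
      simp [List.flatMap_cons]
    rw [hfl, pvRstripNl_append _ _ (by rw [ih]; exact hjoin), ih]
    simp only [List.map_cons]
    rw [PySem.Chars.join_cons_cons]

-- the guarded character A picks is the total default lookup
lemma pvCharEq (line : List Char) (k : Nat) :
    (if (line.length : Int) > (k : Int) then (PySem.List.pyGet? line (k : Int)).getD ' ' else ' ')
      = line.getD k ' ' := by
  rw [PySem.List.pyGet?_natCast]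
  by_cases h : k < line.length
  · rw [if_pos (by exact_mod_cast h), List.getD_eq_getElem?_getD]
  · rw [if_neg (by exact_mod_cast h), List.getD_eq_getElem?_getD,
      List.getElem?_eq_none (by omega)]
    rfl

-- ===== VERDICT (by name: the statement is the Claim_ definition above) =====
theorem rotate_text_clockwise_spec : Claim_equal_rotate_text_clockwise := by
  intro text _
  show rotate_text_clockwise text = rotate_text_clockwise_alt text
  unfold rotate_text_clockwise rotate_text_clockwise_alt
  dsimp only
  rw [pvMaxLen_A _ 0 le_rfl]
  have hfold := pvFold_inv (PySem.Chars.splitlines text.toList) []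
  simp only [pvMaxLen, List.foldr_nil, List.range_zero, List.map_nil, List.length_nil,
    List.nil_append] at hfold
  rw [hfold]
  dsimp only
  set ls := PySem.Chars.splitlines text.toList with hlsdef
  set w := pvMaxLen ls with hwdef
  rw [show max (0 : Int) (w : Int) = (w : Int) by omega]
  by_cases hw0 : w = 0
  · rw [hw0, PySem.List.pyRange_one_eq_nil (by norm_num),
      show (List.foldr (fun r n => max r.length n) 0 ls) = w from rfl, hw0]
    simp [pvRstripNl]
  · have hls0 : ls ≠ [] := by
      intro h
      rw [hwdef, h] at hw0
      exact hw0 rfl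
    -- A side: range loop → flatMap of rows
    rw [PySem.List.pyRange_one]
    simp only [sub_zero, Int.toNat_natCast, zero_add]
    rw [List.foldl_map]
    simp only [PySem.List.foldl_append_singleton_eq_map, pvCharEq, List.append_assoc]
    rw [PySem.List.foldl_append_eq_flatMap]
    simp only [List.nil_append]
    -- assemble: rstrip of newline-terminated concatenation = join of the rows
    rw [pvAssemble (fun j => ls.reverse.map (fun line => line.getD j ' ')) (List.range w)
      (by simpa using hw0) ?hrows]
    · rfl
    case hrows =>
      intro k hk
      constructor
      · simpa using hls0
      · intro hmem
        obtain ⟨line, hline, hEq⟩ := List.mem_map.mp hmem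
        have hlinemem : line ∈ ls := List.mem_reverse.mp hline
        by_cases hkl : k < line.length
        · rw [List.getD_eq_getElem?_getD, List.getElem?_eq_getElem hkl] at hEq
          simp only [Option.getD_some] at hEq
          exact pvSplitlines_no_nl text.toList line hlinemem (hEq ▸ List.getElem_mem hkl)
        · rw [List.getD_eq_getElem?_getD, List.getElem?_eq_none (by omega)] at hEq
          simp at hEq
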